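-- pv_equiv track=rewrite | github.com/dockerian/pyml | ml/misc/integer.py | get_perfect_squares
-- ===== SOURCE A (Python) =====
-- def get_perfect_squares(num: int) -> list:
--     """
--     Get a mininum number of squares sum up to specific integer num.
--
--     @param num: a positive integer target of squares sum.
--     @return: a list of square numbers.
--     """
--     if num <= 0:
--         return []
--     squares = []
--     results = []
--     for i in range(1, num):
--         square = i * i
--         if square <= num:
--             squares.append(square)
--         else:
--             break
--
--     sum = num
--     siz = len(squares)
--     idx = siz - 1
--     while idx >= 0 and sum > 0:
--         n = squares[idx]
--         diff = sum - n
--         if diff >= 0: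
--             results.append(n)
--             sum -= n
--         else:
--             idx -= 1
--     # sum should be zero at this point
--     return results
-- ===== SOURCE B (Python) =====
-- def get_perfect_squares(num: int) -> list:
--     """Greedy largest-square-first decomposition, recursively, with no table."""
--     if num <= 0:
--         return []
--     r = 1
--     while (r + 1) * (r + 1) <= num:
--         r += 1
--     sq = r * r
--     return [sq] + get_perfect_squares(num - sq)
-- ===== Notes on version B (the rewrite author's own statement) =====
-- stated objective: simpler
-- what changed: Replaces A's precomputed squares table and index-pointer while-loop with a direct recursion that finds the largest square <= num by a floor-sqrt scan and subtracts it; also returns [1] for num=1 where A's off-by-one range(1, num) builds an empty table and returns [].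
-- intended difference: For num = 1, A returns [] because range(1, num) is empty so its squares table misses 1*1, while B returns [1], the correct decomposition of 1 as a sum of squares. — e.g. on get_perfect_squares(1): A returns [], B returns [1]
import Mathlib
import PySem

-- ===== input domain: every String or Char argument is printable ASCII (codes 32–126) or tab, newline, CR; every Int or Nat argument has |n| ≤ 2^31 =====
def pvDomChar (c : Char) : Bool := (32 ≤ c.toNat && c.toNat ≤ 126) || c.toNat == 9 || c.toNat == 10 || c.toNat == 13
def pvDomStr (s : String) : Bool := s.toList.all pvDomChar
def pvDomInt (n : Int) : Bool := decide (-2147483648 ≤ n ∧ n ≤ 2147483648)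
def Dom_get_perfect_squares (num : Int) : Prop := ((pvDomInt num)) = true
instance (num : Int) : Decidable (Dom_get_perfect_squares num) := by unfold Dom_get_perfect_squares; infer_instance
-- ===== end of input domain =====

-- B replaces A's precomputed squares table and index-pointer while-loop by a direct greedy
-- recursion (find the largest square ≤ num, subtract, recurse); B also returns [1] for
-- num = 1 where A's range(1, num) off-by-one yields an empty table and [] (see D_ below).

-- ===== PORT A =====
-- the for-loop over range(1, num) with its break: stop at the first square > num
def pvBuildSquares (num : Int) : List Int → List Int
  | [] => []
  | i :: rest =>
      let square := i * i
      if square ≤ num then square :: pvBuildSquares num rest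
      else []

-- the while-loop 'while idx >= 0 and sum > 0'; the fuel argument only makes the loop a
-- total Lean function (each real iteration lowers sum by a square ≥ 1 or lowers idx, so
-- the fuel supplied at the call site is never exhausted); squares[idx] is always in
-- range when it is read, so pyGetD's default 0 is never produced.
def pvWhile (squares : List Int) : Nat → Int → Int → List Int → List Int
  | 0, _, _, results => results
  | fuel+1, sum, idx, results =>
      if idx ≥ 0 ∧ sum > 0 then
        let n := PySem.List.pyGetD squares idx 0
        let diff := sum - n
        if diff ≥ 0 then pvWhile squares fuel (sum - n) idx (results ++ [n])
        else pvWhile squares fuel sum (idx - 1) results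
      else results

def get_perfect_squares (num : Int) : List Int :=
  if num ≤ 0 then []
  else
    let squares := pvBuildSquares num (PySem.List.pyRange 1 num 1)
    pvWhile squares (num.toNat + squares.length + 1) num ((squares.length : Int) - 1) []

-- ===== PORT B =====
-- 'r = 1; while (r+1)*(r+1) <= num: r += 1'  (num ≥ 1 at every call, so work on toNat)
def pvUpR (m r : Nat) : Nat :=
  if (r + 1) * (r + 1) ≤ m then pvUpR m (r + 1) else r
termination_by m - r
decreasing_by
  have h1 : r + 1 ≤ (r + 1) * (r + 1) := Nat.le_mul_of_pos_left _ (Nat.succ_pos r)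
  omega

-- needed for the termination of get_perfect_squares_alt (the subtracted square is ≥ 1)
theorem pvUpR_ge (m r : Nat) : r ≤ pvUpR m r := by
  induction r using pvUpR.induct (m := m) with
  | case1 r h ih => rw [pvUpR]; simp only [if_pos h]; omega
  | case2 r h => rw [pvUpR]; simp only [if_neg h]; omega

def get_perfect_squares_alt (num : Int) : List Int :=
  if num ≤ 0 then []
  else
    let r := pvUpR num.toNat 1
    let sq : Int := (r : Int) * (r : Int)
    sq :: get_perfect_squares_alt (num - sq)
termination_by num.toNat
decreasing_by
  have h1 : 1 ≤ pvUpR num.toNat 1 := pvUpR_ge _ _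
  have h2 : (1 : Int) ≤ (pvUpR num.toNat 1 : Int) * (pvUpR num.toNat 1 : Int) := by
    have hr : (1 : Int) ≤ (pvUpR num.toNat 1 : Int) := by exact_mod_cast h1
    nlinarith
  omega

-- ===== PRECONDITION & SPEC =====
-- For num = 1, A returns [] because range(1, num) is empty so its squares table misses
-- 1*1, while B returns [1], the correct decomposition of 1 as a sum of squares.
def D_get_perfect_squares (num : Int) : Prop := num = 1
instance (num : Int) : Decidable (D_get_perfect_squares num) := by unfold D_get_perfect_squares; infer_instance

def Spec_get_perfect_squares (num : Int) (out : List Int) : Prop := ¬ D_get_perfect_squares num → out = get_perfect_squares_alt num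
instance (num : Int) (out : List Int) : Decidable (Spec_get_perfect_squares num out) := by unfold Spec_get_perfect_squares; infer_instance

def pvDiffWitness_get_perfect_squares : Int := 1
def pvDiffWitnessOut_get_perfect_squares : (List Int) × (List Int) := ([], [1])

-- ===== CLAIM (what is proved, stated in full; the proofs are below) =====
def Claim_unchanged_get_perfect_squares : Prop := ∀ (num : Int), Dom_get_perfect_squares num → Spec_get_perfect_squares num (get_perfect_squares num)
def Claim_changed_get_perfect_squares : Prop := Dom_get_perfect_squares (pvDiffWitness_get_perfect_squares) ∧ D_get_perfect_squares (pvDiffWitness_get_perfect_squares) ∧ get_perfect_squares (pvDiffWitness_get_perfect_squares) = pvDiffWitnessOut_get_perfect_squares.1 ∧ get_perfect_squares_alt (pvDiffWitness_get_perfect_squares) = pvDiffWitnessOut_get_perfect_squares.2 ∧ pvDiffWitnessOut_get_perfect_squares.1 ≠ pvDiffWitnessOut_get_perfect_squares.2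
def Claim_exact_get_perfect_squares : Prop := ∀ (num : Int), Dom_get_perfect_squares num → D_get_perfect_squares num → get_perfect_squares num ≠ get_perfect_squares_alt num

-- ===== LEMMAS AND PROOFS =====

-- B's scan stops exactly at the floor square root
theorem pvUpR_eq_sqrt (m r : Nat) (h : r ≤ Nat.sqrt m) : pvUpR m r = Nat.sqrt m := by
  induction r using pvUpR.induct (m := m) with
  | case1 r hc ih =>
      rw [pvUpR]; simp only [if_pos hc]
      exact ih (Nat.le_sqrt.mpr hc)
  | case2 r hc =>
      rw [pvUpR]; simp only [if_neg hc]
      have : Nat.sqrt m < r + 1 := by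
        by_contra hlt
        exact hc (Nat.le_sqrt.mp (by omega))
      omega

-- one unfolding of B's recursion on a positive input
theorem alt_pos (num : Int) (h : ¬ num ≤ 0) :
    get_perfect_squares_alt num =
      ((pvUpR num.toNat 1 : Int) * (pvUpR num.toNat 1 : Int)) ::
        get_perfect_squares_alt (num - (pvUpR num.toNat 1 : Int) * (pvUpR num.toNat 1 : Int)) := by
  rw [get_perfect_squares_alt]; simp [h]

theorem alt_nonpos (num : Int) (h : num ≤ 0) : get_perfect_squares_alt num = [] := by
  rw [get_perfect_squares_alt]; simp [h]

theorem alt_one : get_perfect_squares_alt 1 = [1] := by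
  have h1 : pvUpR (Int.toNat 1) 1 = 1 := by rw [pvUpR]; norm_num
  rw [alt_pos 1 (by norm_num), h1]
  norm_num [alt_nonpos]

-- A's for-loop, started at value a+1, builds the squares (a+1)², …, s², s = √m
theorem buildSquares_gen (m : Nat) (t a : Nat) (ha : a ≤ Nat.sqrt m) :
    pvBuildSquares (m : Int) ((List.range t).map (fun (k : Nat) => ((a : Int) + 1 + (k : Int)))) =
      (List.range (min t (Nat.sqrt m - a))).map
        (fun (k : Nat) => ((a : Int) + 1 + (k : Int)) * ((a : Int) + 1 + (k : Int))) := by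
  induction t generalizing a with
  | zero => rfl
  | succ t ih =>
      rw [List.range_succ_eq_map]
      simp only [List.map_cons, List.map_map]
      rw [pvBuildSquares]
      have hcond : (((a : Int) + 1 + ((0:Nat) : Int)) * ((a : Int) + 1 + ((0:Nat) : Int)) ≤ (m : Int)) ↔ a + 1 ≤ Nat.sqrt m := by
        rw [Nat.le_sqrt]
        push_cast
        constructor
        · intro h; exact_mod_cast (by linarith : ((a:Int)+1) * ((a:Int)+1) ≤ (m:Int))
        · intro h; have : ((a:Int)+1) * ((a:Int)+1) ≤ (m:Int) := by exact_mod_cast h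
          linarith
      by_cases hle : a + 1 ≤ Nat.sqrt m
      · simp only [if_pos (hcond.mpr hle)]
        have htail : (List.map ((fun (k : Nat) => ((a : Int) + 1 + (k : Int))) ∘ Nat.succ) (List.range t)) =
            (List.range t).map (fun (k : Nat) => (((a + 1 : Nat) : Int) + 1 + (k : Int))) := by
          apply List.map_congr_left; intro k _; simp [Function.comp]; ring
        have hrec := ih (a + 1) hle
        have hmin : min (t + 1) (Nat.sqrt m - a) = min t (Nat.sqrt m - (a + 1)) + 1 := by omega
        rw [hmin, List.range_succ_eq_map]
        simp only [List.map_cons, List.map_map]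
        rw [htail, hrec]
        congr 1
        apply List.map_congr_left; intro k _; simp [Function.comp]; ring
      · simp only [if_neg (fun hc => hle (hcond.mp hc))]
        have h0 : Nat.sqrt m - a = 0 := by omega
        rw [h0]
        simp

-- the greedy while-loop over the table [1², …, s²] computes B's recursion:
-- invariant sum < (idx+2)², so the square it appends is the largest one ≤ sum
theorem pvWhile_eq (s : Nat) :
    ∀ (fuel : Nat) (sum idx : Int) (results : List Int),
      0 ≤ sum → 0 ≤ idx → idx < (s : Int) → sum < (idx + 2) * (idx + 2) →
      sum.toNat + idx.toNat + 1 ≤ fuel →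
      pvWhile ((List.range s).map (fun (k : Nat) => ((k : Int) + 1) * ((k : Int) + 1))) fuel sum idx results
        = results ++ get_perfect_squares_alt sum := by
  intro fuel
  induction fuel with
  | zero => intro sum idx results _ _ _ _ hf; omega
  | succ fuel ih =>
      intro sum idx results hsum hidx hidxs hub hf
      rw [pvWhile]
      by_cases hpos : sum > 0
      · simp only [if_pos (show idx ≥ 0 ∧ sum > 0 from ⟨hidx, hpos⟩)]
        have hidxlt : idx.toNat < s := by omega
        have hn : PySem.List.pyGetD ((List.range s).map (fun (k : Nat) => ((k : Int) + 1) * ((k : Int) + 1))) idx 0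
            = (idx + 1) * (idx + 1) := by
          rw [PySem.List.pyGetD_eq_getElem _ 0 hidx (by simp only [List.length_map, List.length_range]; omega)]
          simp only [List.getElem_map, List.getElem_range]
          rw [Int.toNat_of_nonneg hidx]
        rw [hn]
        have hsumc : ((sum.toNat : Int)) = sum := Int.toNat_of_nonneg hsum
        have hidxc : ((idx.toNat : Int)) = idx := Int.toNat_of_nonneg hidx
        by_cases hge : sum - (idx + 1) * (idx + 1) ≥ 0
        · simp only [if_pos hge]
          have hsqrt : Nat.sqrt sum.toNat = idx.toNat + 1 := by
            have h1 : (idx.toNat + 1) * (idx.toNat + 1) ≤ sum.toNat := by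
              nlinarith
            have h2 : sum.toNat < (idx.toNat + 1 + 1) * (idx.toNat + 1 + 1) := by
              nlinarith
            exact (Nat.eq_sqrt.mpr ⟨h1, h2⟩).symm
          have hr : (pvUpR sum.toNat 1 : Int) = idx + 1 := by
            rw [pvUpR_eq_sqrt sum.toNat 1 (by omega), hsqrt]
            push_cast; omega
          have hstep := alt_pos sum (by omega)
          rw [hr] at hstep
          have hone : (1 : Int) ≤ (idx + 1) * (idx + 1) := by nlinarith
          have hrec := ih (sum - (idx + 1) * (idx + 1)) idx (results ++ [(idx + 1) * (idx + 1)])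
            (by omega) hidx hidxs (by nlinarith) (by omega)
          rw [hrec, hstep]
          simp
        · simp only [if_neg hge]
          have hidx1 : 1 ≤ idx := by
            by_contra hc
            have h0 : idx = 0 := by omega
            rw [h0] at hge
            simp at hge
            omega
          have hrec := ih sum (idx - 1) results hsum (by omega) (by omega) (by nlinarith) (by omega)
          rw [hrec]
      · have hcond : ¬ (idx ≥ 0 ∧ sum > 0) := by omega
        simp only [if_neg hcond]
        rw [alt_nonpos sum (by omega)]
        simp

-- ===== VERDICT (by name: the statement is the Claim_ definition above) =====
theorem get_perfect_squares_spec : Claim_unchanged_get_perfect_squares := by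
  intro num _ hD
  by_cases hle : num ≤ 0
  · rw [get_perfect_squares, alt_nonpos num hle]; simp [hle]
  · have hne1 : num ≠ 1 := hD
    have h2 : 2 ≤ num := by omega
    set m := num.toNat with hm
    have hnum : ((m : Int)) = num := Int.toNat_of_nonneg (by omega)
    have hm2 : 2 ≤ m := by omega
    set s := Nat.sqrt m with hsdef
    have hs1 : 1 ≤ s := Nat.sqrt_pos.mpr (by omega)
    have hslt : s < m := Nat.sqrt_lt_self (by omega)
    -- the built table is [1², …, s²]
    have hbuild : pvBuildSquares num (PySem.List.pyRange 1 num 1) =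
        (List.range s).map (fun (k : Nat) => ((k : Int) + 1) * ((k : Int) + 1)) := by
      rw [PySem.List.pyRange_one]
      have hlist : (List.range ((num - 1).toNat)).map (fun (k : Nat) => ((1 : Int) + (k : Int))) =
          (List.range ((num - 1).toNat)).map (fun (k : Nat) => (((0:Nat) : Int) + 1 + (k : Int))) := by
        apply List.map_congr_left; intro k _; push_cast; ring
      rw [hlist, ← hnum, buildSquares_gen m _ 0 (by omega)]
      have hmin : min (((m : Int) - 1).toNat) (Nat.sqrt m - 0) = s := by omega
      rw [hmin]
      apply List.map_congr_left; intro k _; push_cast; ring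
    simp only [get_perfect_squares, if_neg hle]
    rw [hbuild]
    simp only [List.length_map, List.length_range]
    have hub : num < ((s : Int) - 1 + 2) * ((s : Int) - 1 + 2) := by
      have hlt := Nat.lt_succ_sqrt m
      have hc : (m : Int) < ((s : Int) + 1) * ((s : Int) + 1) := by exact_mod_cast hlt
      rw [hnum] at hc
      have he : ((s : Int) - 1 + 2) = (s : Int) + 1 := by ring
      rw [he]; exact hc
    have hw := pvWhile_eq s (m + s + 1) num ((s : Int) - 1) []
      (by omega) (by omega) (by omega) hub (by omega)
    rw [hw]
    simp

theorem get_perfect_squares_changed : Claim_changed_get_perfect_squares := by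
  unfold Claim_changed_get_perfect_squares
  refine ⟨by decide, by decide, by decide, ?_, by decide⟩
  show get_perfect_squares_alt 1 = [1]
  exact alt_one

theorem get_perfect_squares_tight : Claim_exact_get_perfect_squares := by
  intro num _ hD
  have h1 : num = 1 := hD
  subst h1
  rw [alt_one]
  decide
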